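/- GENERATED by mk_final_copies.py from the proof of the farm's unit `start_decoder.C13d` (farm:start_decoder.C13d.1: Lemmas.lean) as the
   re-elaboration sweep compiled it — do not edit. -/
import Asan.CheckWalk
import Vorbis.Spec.StartDecoderATest
import Vorbis.Spec.StartDecoderCarry
import Vorbis.Spec.Units.start_decoder_C13d

/-!
  LEMMAS of the unit `start_decoder.C13d` (0x114fe7 → the inner head 0x114f32 with `k + 1` ∨ the epilogue 0x113b22), one per
  stretch between two contract calls:

      c13d_site        a check site inside the struct `cb(i)`
      c13d_AtStub      the assertion at the entry of the overflow stub 0x115027 (`In13K` + `ecx = lookup_values`)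
      c13d_next        PURE: `In13K` for `k + 1` over the stretch's stores (`C13.carry13`)
      c13d_mul         PURE: `imul ebx, ecx` without overflow
      c13d_body        0x114fe7 → 0x114f32 ∨ 0x115027   (check 0x114fe7, `last`, `++k`, `mul ebx ; jo`; six paths)
      c13d_AtFreed     the assertion at 0x11503c (`Frame` + CUR(i) for the ghost without the `mults` block, `rbp = f`)
      c13d_arena_pre   PURE: the allocators' common precondition at a call
      c13d_edx         PURE: `lea edx, [rcx+rcx]`
      c13d_free        0x115027 → 0x11503c   (`setup_temp_free(f, mults, 2·LV)`: `Cur.free_call`)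
      c13d_err         0x11503c → 0x113b22   (`error(f, 20)`: `Frame.step`, `Cur.step`, `Cur.failed`)
  The composition is Proof.lean.
-/

open X86 X86.User Asan Vorbis Vorbis.Spec Vorbis.Spec.StartDecoder

set_option maxRecDepth 100000
set_option maxHeartbeats 4000000

namespace Vorbis.Spec.start_decoder_C13d

/-- **A check site inside the struct `cb(i)`** (`k` bytes at `c + off`, `c = codebooks + 2120·i`): inside the codebooks block
(`CodebooksOK` over the function's block predicate: `SDw.cb0`), which is live (`Env.live`). -/
theorem c13d_site {g : Ghost} {i : Nat} {A2 A3 Ai : Arena} {A : Arena × List Obj} {v : State}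
    (hc : Cur g i A2 A3 Ai A v) (off k : Nat) (h1 : 1 ≤ k) (h2 : off + k ≤ 2120) :
    Site (Live (stackObjs g.frames' ++ A.2)) (g.cb v.mem i + off) k := by
  rcases (hc.sd.cb0 (by omega)).1 with h0 | hok
  · exact absurd h0 (hc.sd.cb0 (by omega)).2
  · exact hok.site_cb_field hc.sd.env.live i hc.lt off k h2 h1 rfl

/-- The entry of the overflow stub (0x115027 `mov rbp, [rsp+18H]`). -/
abbrev c13d_stub : Word := Vorbis.L.start_decoder.cut173 - 21

/-- **The assertion at the entry of the overflow stub** (0x115027): the inner loop's invariant (with the counter already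
incremented) and `ecx = lookup_values` (loaded at 0x11500c, read by `lea edx, [rcx+rcx]`). -/
def c13d_AtStub (u₀ : State) (g : Ghost) (v : State) : Prop :=
  ∃ (i : Nat) (n d : Int) (j kk : Nat) (A : Arena × List Obj) (mults : Nat) (A2 A3 Ai Am : Arena),
    In13K u₀ g i A2 A3 Ai Am A mults n d j kk c13d_stub v ∧
    v.reg .rcx = addr (Codebook.lookup_values v.mem (g.cb v.mem i))

/-- **The invariant of the inner loop after the stretch of C13d**, pure part: the stretch writes only the pushed return address of the
check call and the two float locals `d[R+38H]`, `d[R+40H]` (quiet windows of `C13.carry13`), `r15d` is incremented, `ebx` is the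
new divisor. Also: `lookup_values` of the book reads the same. -/
theorem c13d_next {u₀ : State} {g : Ghost} {i : Nat} {A2 A3 Ai Am : Arena} {A : Arena × List Obj} {mults : Nat} {n d : Int}
    {j kk : Nat} {pc pc' : Word} {v w : State}
    (h : In13K u₀ g i A2 A3 Ai Am A mults n d j kk pc v) (hklt : (kk : Int) < d)
    (hs : Mem.SameExcept [⟨(v.reg .rsp).toNat - 8, (v.reg .rsp).toNat⟩,
      ⟨(v.reg .rsp).toNat + 56, (v.reg .rsp).toNat + 68⟩] v.mem w.mem)
    (hun : ShadowUntouched v.mem w.mem) (hrip : w.rip = pc') (hrsp : w.reg .rsp = v.reg .rsp) (hcode : CodeOK u₀ w.mem)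
    (hinv : abiInv w) (hr14 : w.reg .r14 = v.reg .r14) (hr12 : w.reg .r12 = v.reg .r12)
    (hr15 : w.reg .r15 = Word.ofBV (Word.part Width.w32 (v.reg .r15) + 1#32))
    (hdiv : ∃ dv, w.reg .rbx = addr dv ∧ 1 ≤ dv ∧ dv < 2 ^ 32) :
    In13K u₀ g i A2 A3 Ai Am A mults n d j (kk + 1) pc' w ∧
      Codebook.lookup_values w.mem (g.cb w.mem i) = Codebook.lookup_values v.mem (g.cb v.mem i) := by
  have hfr := h.frame
  have hpos : Pos g A := Pos.of hfr h.cur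
  have p1 := hpos.r_eq
  have p2 := hpos.ra_lo
  have p3 := hpos.ra_hi
  have hsp : (v.reg .rsp).toNat = g.R := by
    rw [hfr.rsp]
    exact toNat_addr _ (by omega)
  rw [hsp] at hs
  have hquiet : ∀ x, x ∈ [(⟨g.R - 8, g.R⟩ : Span), ⟨g.R + 56, g.R + 68⟩] → C13.QuietWin13 g x := by
    intro x hx
    simp only [List.mem_cons, List.mem_nil_iff, or_false] at hx
    unfold C13.QuietWin13
    rcases hx with rfl | rfl
    · left
      simp only []
      omega
    · right
      left
      simp only []
      omega
  have hd2 := h.k.k1.dim_le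
  have hdq := h.d_eq
  have e15 : w.reg .r15 = addr (kk + 1) := by
    rw [hr15, h.r15]
    unfold addr
    exact cnt32_succ kk (by omega)
  have hK := C13.carry13 (pc' := pc') h hs hun hquiet hrip hrsp hcode hinv hr14 (hr12.trans h.r12) h.j_lt e15
    (by omega) hdiv
  obtain ⟨_, _, hcb, _, hsf, _⟩ := C13.core13 (pc' := pc') h hs hun hquiet hrip hrsp hcode hinv hr14
  refine ⟨hK, ?_⟩
  rw [hcb, hsf.lookup_values]

/-- `imul ebx, ecx` after `mul ebx ; jo` not taken: the new divisor is the product of the numbers. -/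
theorem c13d_mul (dv lv : Nat) (h : dv * lv < 2 ^ 32) :
    Word.ofBV (Word.part Width.w32 (addr dv) * BitVec.ofNat 32 lv) = addr (dv * lv) := by
  unfold addr
  rw [cnt32_part, ← BitVec.ofNat_mul, cnt32_ofBV (dv * lv) h]

/-- The body stretch of C13d (0x114fe7 … 0x115021 with the back edge 0x114f19 … 0x114f2c): the check of `c->sequence_p` (`rdi` from the
assertion), `if (c->sequence_p) last = val` (float locals), `++k`; `k + 1 ≥ D`, or `mul ebx` without overflow (`div *= LV`): the inner
head with `k + 1` (`c13d_next`); `mul ebx` overflowed: the stub 0x115027 with the same invariant and `ecx = LV`. The loads of `*c` at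
0x115003 / 0x11500c are unchecked: their `Lay.Has` facts (`hh0`, `hh28`) come from where the struct is (`MInv.c_where`). -/
theorem c13d_body (Lay : Layout) (hLay : Lay.hi = 0x1000000) (μ : Microarch) (hμ : UserX.MicroOK μ) (u₀ : State)
    (hcode : HasCodeNat Lay u₀ Vorbis.L.start_decoder.entry Vorbis.Code.code_start_decoder.nat Vorbis.L.start_decoder.size)
    (h_load1 : Asan.SmallCheck Lay μ Vorbis.WayInv (Vorbis.CodeOK u₀) [.rax, .rdx] 1 Vorbis.L.__asan_load1_noabort.entry)
    (g : Ghost) (i : Nat) (n d : Int) (j kk : Nat) (v : State) (hat : At13K26 u₀ g i n d j kk v) :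
    ReachVia Lay μ WayInv v (fun w => At13K u₀ g i n d j (kk + 1) L.start_decoder.loop12 w ∨ c13d_AtStub u₀ g w) := by
  obtain ⟨A, mults, A2, A3, Ai, Am, h, hklt, c_rdi⟩ := hat
  have hfr := h.frame
  have he := hfr.entry
  v_entry he
  have w_rip := hfr.rip
  have w_eq : Mem.EqOn Vorbis.L.textLo Vorbis.L.textHi u₀.mem v.mem := hfr.code
  have hdf : v.flags .df = false := (show abiInv _ from hfr.inv).1
  have hmx : v.mxcsr &&& 0x1F80 = 0x1F80 := (show abiInv _ from hfr.inv).2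
  have hsse := Vorbis.sseOK_of_abiInv hfr.inv
  have hRA : g.RA = (g.e.reg .rsp).toNat := rfl
  have hpos : Pos g A := Pos.of hfr h.cur
  have hm0 : MInv g i A2 A3 Ai A v.mem := MInv.of hfr h.cur
  have hcw := hm0.c_where
  have p1 := hpos.r_eq
  have p2 := hpos.ra_lo
  have p3 := hpos.ra_hi
  have p4 := hpos.ar_lo
  have hsp : (v.reg .rsp).toNat = g.R := by
    rw [hfr.rsp]
    exact toNat_addr _ (by omega)
  have c_r14 := h.cur.r14
  have c_r15 := h.r15
  have c_r12 := h.r12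
  obtain ⟨dv, c_rbx, hdv1, hdv2⟩ := h.div
  have hsite := c13d_site h.cur 26 1 (by decide) (by decide)
  have hwh := Vorbis.Spec.site_where hfr.shadow hfr.offText (by omega) hsite
  have e : L.textHi = 0x119d40 := rfl
  have ecb : (addr (g.cb v.mem i)).toNat = g.cb v.mem i := toNat_addr _ (by omega)
  have hd1 := h.k.k1.dim_pos
  have hd2 := h.k.k1.dim_le
  have hdq := h.d_eq
  have hDv : v.mem.readLE (addr (g.cb v.mem i)) 4 = d.toNat := by
    have ee : Codebook.dimensions v.mem (g.cb v.mem i) = sint32 (v.mem.readLE (addr (g.cb v.mem i)) 4) := by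
      simp only [vacc, voff, Mem.i32, Mem.u32, Nat.add_zero]
    have hc := sint32_cases (v.mem.readLE (addr (g.cb v.mem i)) 4)
    rw [← hdq, ee]
    rw [ee] at hd1
    rcases hc with ⟨_, h2⟩ | ⟨_, h2⟩
    · rw [h2]
      exact (Int.toNat_natCast _).symm
    · have hlt : v.mem.readLE (addr (g.cb v.mem i)) 4 < 256 ^ 4 := Mem.readLE_lt' v.mem _ 4
      rw [h2] at hd1
      omega
  have hLV : v.mem.readLE (addr (g.cb v.mem i) + 28) 4 = Codebook.lookup_values v.mem (g.cb v.mem i) := by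
    simp only [vacc, voff, Mem.u32, addr_add_lit]
  obtain ⟨sq, hSq⟩ : ∃ sq, v.mem.readLE (addr (g.cb v.mem i) + 26) 1 = sq := ⟨_, rfl⟩
  have hpdv : (Word.part Width.w32 (addr dv)).toNat = dv := by
    unfold addr
    exact cnt32_part_toNat dv hdv2
  have hh26 : Lay.Has (addr (g.cb v.mem i) + 26) 1 := by
    constructor
    · show 0x100000 ≤ _
      u_omega
    · rw [hLay]
      u_omega
  have hh0 : Lay.Has (addr (g.cb v.mem i)) 4 := by
    constructor
    · show 0x100000 ≤ _
      rw [ecb]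
      omega
    · rw [hLay, ecb]
      omega
  have hh28 : Lay.Has (addr (g.cb v.mem i) + 28) 4 := by
    constructor
    · show 0x100000 ≤ _
      u_omega
    · rw [hLay]
      u_omega
  u_walk hcode [hμ.vendor] until [Vorbis.L.start_decoder.loop12, c13d_stub] span [Vorbis.L.textLo, Vorbis.L.textHi] side (first | v_side | (simp only [addr]; v_side))
  case check_114fe7 =>
    have hun : ShadowUntouched v.mem s_114fe7.mem := by v_untouched
    exact Vorbis.Spec.check_site hfr.shadow hun hsite (toNat_addr _ (by omega))
  · -- sequence_p ≠ 0, `k + 1 ≥ D`: the divisor is unchanged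
    have hs : Mem.SameExcept [⟨(v.reg .rsp).toNat - 8, (v.reg .rsp).toNat⟩,
        ⟨(v.reg .rsp).toNat + 56, (v.reg .rsp).toNat + 68⟩] v.mem s_114f2c.mem := by
      u_same
    have hun : ShadowUntouched v.mem s_114f2c.mem := by v_untouched
    have hinv : (conv u₀).inv s_114f2c := by v_inv
    have e15 : s_114f2c.reg .r15 = Word.ofBV (Word.part Width.w32 (v.reg .r15) + 1#32) := by
      rw [w_r15, c_r15]
    have hN := c13d_next (pc' := Vorbis.L.start_decoder.loop12) h hklt hs hun w_rip w_rsp w_eq hinv (w_kept.get .r14 rfl)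
      (w_kept.get .r12 rfl) e15 ⟨dv, (w_kept.get .rbx rfl).trans c_rbx, hdv1, hdv2⟩
    exact ReachVia.done (Or.inl ⟨A, mults, A2, A3, Ai, Am, hN.1⟩)
  · -- sequence_p ≠ 0, `k + 1 < D`, `mul ebx` overflowed: the stub
    have hs : Mem.SameExcept [⟨(v.reg .rsp).toNat - 8, (v.reg .rsp).toNat⟩,
        ⟨(v.reg .rsp).toNat + 56, (v.reg .rsp).toNat + 68⟩] v.mem s_115021.mem := by
      u_same
    have hun : ShadowUntouched v.mem s_115021.mem := by v_untouched
    have hinv : (conv u₀).inv s_115021 := by v_inv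
    have e15 : s_115021.reg .r15 = Word.ofBV (Word.part Width.w32 (v.reg .r15) + 1#32) := by
      rw [w_r15, c_r15]
    have hN := c13d_next (pc' := c13d_stub) h hklt hs hun w_rip w_rsp w_eq hinv (w_kept.get .r14 rfl)
      (w_kept.get .r12 rfl) e15 ⟨dv, (w_kept.get .rbx rfl).trans c_rbx, hdv1, hdv2⟩
    refine ReachVia.done (Or.inr ⟨i, n, d, j, kk + 1, A, mults, A2, A3, Ai, Am, hN.1, ?_⟩)
    rw [hN.2, w_rcx]
    unfold addr
    exact cnt32_ofBV _ (by have := h.mults.lv_lt; omega)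
  · -- sequence_p ≠ 0, `k + 1 < D`, no overflow: `div *= LV`
    have hs : Mem.SameExcept [⟨(v.reg .rsp).toNat - 8, (v.reg .rsp).toNat⟩,
        ⟨(v.reg .rsp).toNat + 56, (v.reg .rsp).toNat + 68⟩] v.mem s_114f2c.mem := by
      u_same
    have hun : ShadowUntouched v.mem s_114f2c.mem := by v_untouched
    have hinv : (conv u₀).inv s_114f2c := by v_inv
    have e15 : s_114f2c.reg .r15 = Word.ofBV (Word.part Width.w32 (v.reg .r15) + 1#32) := by
      rw [w_r15, c_r15]
    have hlv1 := h.mults.lv_pos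
    have hlv2 := h.mults.lv_lt
    rw [hpdv, Nat.mod_eq_of_lt (by omega), Nat.mul_comm] at hbr_115019
    have erbx : s_114f2c.reg .rbx = addr (dv * Codebook.lookup_values v.mem (g.cb v.mem i)) := by
      rw [w_rbx]
      exact c13d_mul _ _ hbr_115019
    have hN := c13d_next (pc' := Vorbis.L.start_decoder.loop12) h hklt hs hun w_rip w_rsp w_eq hinv (w_kept.get .r14 rfl)
      (w_kept.get .r12 rfl) e15 ⟨_, erbx, Nat.mul_pos hdv1 hlv1, hbr_115019⟩
    exact ReachVia.done (Or.inl ⟨A, mults, A2, A3, Ai, Am, hN.1⟩)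
  · -- sequence_p = 0 (`last` is reloaded into `d[R+38H]`), `k + 1 ≥ D`: the divisor is unchanged
    have hs : Mem.SameExcept [⟨(v.reg .rsp).toNat - 8, (v.reg .rsp).toNat⟩,
        ⟨(v.reg .rsp).toNat + 56, (v.reg .rsp).toNat + 68⟩] v.mem s_114f2c.mem := by
      u_same
    have hun : ShadowUntouched v.mem s_114f2c.mem := by v_untouched
    have hinv : (conv u₀).inv s_114f2c := by v_inv
    have e15 : s_114f2c.reg .r15 = Word.ofBV (Word.part Width.w32 (v.reg .r15) + 1#32) := by
      rw [w_r15, c_r15]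
    have hN := c13d_next (pc' := Vorbis.L.start_decoder.loop12) h hklt hs hun w_rip w_rsp w_eq hinv (w_kept.get .r14 rfl)
      (w_kept.get .r12 rfl) e15 ⟨dv, (w_kept.get .rbx rfl).trans c_rbx, hdv1, hdv2⟩
    exact ReachVia.done (Or.inl ⟨A, mults, A2, A3, Ai, Am, hN.1⟩)
  · -- sequence_p = 0 (`last` is reloaded into `d[R+38H]`), `k + 1 < D`, `mul ebx` overflowed: the stub
    have hs : Mem.SameExcept [⟨(v.reg .rsp).toNat - 8, (v.reg .rsp).toNat⟩,
        ⟨(v.reg .rsp).toNat + 56, (v.reg .rsp).toNat + 68⟩] v.mem s_115021.mem := by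
      u_same
    have hun : ShadowUntouched v.mem s_115021.mem := by v_untouched
    have hinv : (conv u₀).inv s_115021 := by v_inv
    have e15 : s_115021.reg .r15 = Word.ofBV (Word.part Width.w32 (v.reg .r15) + 1#32) := by
      rw [w_r15, c_r15]
    have hN := c13d_next (pc' := c13d_stub) h hklt hs hun w_rip w_rsp w_eq hinv (w_kept.get .r14 rfl)
      (w_kept.get .r12 rfl) e15 ⟨dv, (w_kept.get .rbx rfl).trans c_rbx, hdv1, hdv2⟩
    refine ReachVia.done (Or.inr ⟨i, n, d, j, kk + 1, A, mults, A2, A3, Ai, Am, hN.1, ?_⟩)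
    rw [hN.2, w_rcx]
    unfold addr
    exact cnt32_ofBV _ (by have := h.mults.lv_lt; omega)
  · -- sequence_p = 0 (`last` is reloaded into `d[R+38H]`), `k + 1 < D`, no overflow: `div *= LV`
    have hs : Mem.SameExcept [⟨(v.reg .rsp).toNat - 8, (v.reg .rsp).toNat⟩,
        ⟨(v.reg .rsp).toNat + 56, (v.reg .rsp).toNat + 68⟩] v.mem s_114f2c.mem := by
      u_same
    have hun : ShadowUntouched v.mem s_114f2c.mem := by v_untouched
    have hinv : (conv u₀).inv s_114f2c := by v_inv
    have e15 : s_114f2c.reg .r15 = Word.ofBV (Word.part Width.w32 (v.reg .r15) + 1#32) := by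
      rw [w_r15, c_r15]
    have hlv1 := h.mults.lv_pos
    have hlv2 := h.mults.lv_lt
    rw [hpdv, Nat.mod_eq_of_lt (by omega), Nat.mul_comm] at hbr_115019
    have erbx : s_114f2c.reg .rbx = addr (dv * Codebook.lookup_values v.mem (g.cb v.mem i)) := by
      rw [w_rbx]
      exact c13d_mul _ _ hbr_115019
    have hN := c13d_next (pc' := Vorbis.L.start_decoder.loop12) h hklt hs hun w_rip w_rsp w_eq hinv (w_kept.get .r14 rfl)
      (w_kept.get .r12 rfl) e15 ⟨_, erbx, Nat.mul_pos hdv1 hlv1, hbr_115019⟩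
    exact ReachVia.done (Or.inl ⟨A, mults, A2, A3, Ai, Am, hN.1⟩)

/-- **The assertion at 0x11503c** (`setup_temp_free` returned): `Frame` and CUR(i) for the ghost with the `mults` block released,
`rbp = f` (reloaded at 0x115027; callee-saved). -/
def c13d_AtFreed (u₀ : State) (g : Ghost) (v : State) : Prop :=
  ∃ (A : Arena × List Obj) (i : Nat) (A2 A3 Ai : Arena),
    Frame u₀ g Vorbis.L.start_decoder.cut173 A v ∧ Cur g i A2 A3 Ai A v ∧ v.reg .rbp = addr g.f

/-- **The allocators' common precondition at a call of the codebook loop**: the state `s` at the callee's entry has the memory of the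
cut point but for the pushed return address below `R` (`hmem`), `rsp = R − 8`, `rdi = f`. -/
theorem c13d_arena_pre {u₀ : State} {g : Ghost} {i : Nat} {A2 A3 Ai : Arena} {A : Arena × List Obj} {pc : Word} {v s : State}
    (hfr : Frame u₀ g pc A v) (hcur : Cur g i A2 A3 Ai A v) (hun : ShadowUntouched v.mem s.mem)
    (hmem : Mem.EqOn (g.f + 112) (g.f + 136) v.mem s.mem) (hrsp : (s.reg .rsp).toNat + 8 = g.R)
    (hrdi : (s.reg .rdi).toNat = g.f) : ArenaPre A.1 A.2 g.frames' s := by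
  have hob := hcur.sd.bits.OB1
  have hpos : Pos g A := Pos.of hfr hcur
  have hf2 := hpos.f_hi
  refine ⟨⟨?_, hfr.offText⟩, ?_, ?_, hcur.hand.arenaText⟩
  · rw [hrsp]
    exact hfr.shadow.untouched hun
  · rw [hrdi]
    exact hcur.sd.env.live _ hob
  · rw [hrdi]
    apply hcur.sd.arena.frame (by simp only [voff]; omega)
    simp only [voff]
    exact hmem

/-- `lea edx, [rcx+rcx]` with `ecx = LV < 2^30`: the size argument `2·LV` of `setup_temp_free`, read unsigned. -/
theorem c13d_edx (lv : Nat) (h : lv < 2 ^ 30) :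
    (Word.ofBV (BitVec.setWidth 32 (addr lv + addr lv).toBitVec)).toNat % 2 ^ 32 = 2 * lv := by
  rw [Vorbis.toNat_ofBV32, BitVec.toNat_setWidth, UInt64.toNat_toBitVec, UInt64.toNat_add, toNat_addr _ (by omega)]
  omega

/-- The overflow stub, first half (0x115027 … 0x115037 and the callee): `rbp = f` from its slot, `setup_temp_free(f, mults, 2·LV)`
releases the top temp block (`Cur.free_call`). -/
theorem c13d_free (Lay : Layout) (hLay : Lay.hi = 0x1000000) (μ : Microarch) (hμ : UserX.MicroOK μ) (u₀ : State)
    (hcode : HasCodeNat Lay u₀ Vorbis.L.start_decoder.entry Vorbis.Code.code_start_decoder.nat Vorbis.L.start_decoder.size)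
    (h_free : ∀ (others : List Obj) (frames : List (Nat × FrameLayout)) (A : Arena) (m : Nat) (rest : List (Nat × Nat)), Calls Lay μ Vorbis.WayInv (Vorbis.conv u₀) Vorbis.L.setup_temp_free.entry (Vorbis.Spec.setup_temp_free.spec others frames A m rest))
    (g : Ghost) (v : State) (hat : c13d_AtStub u₀ g v) :
    ReachVia Lay μ WayInv v (fun w => c13d_AtFreed u₀ g w) := by
  obtain ⟨i, n, d, j, kk, A, mults, A2, A3, Ai, Am, h, c_rcx⟩ := hat
  have hfr := h.frame
  have hcur := h.cur
  have he := hfr.entry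
  v_entry he
  simp only [depth] at he_room he_stack
  have w_rip := hfr.rip
  have w_eq : Mem.EqOn Vorbis.L.textLo Vorbis.L.textHi u₀.mem v.mem := hfr.code
  have hdf : v.flags .df = false := (show abiInv _ from hfr.inv).1
  have hmx : v.mxcsr &&& 0x1F80 = 0x1F80 := (show abiInv _ from hfr.inv).2
  have hsse := Vorbis.sseOK_of_abiInv hfr.inv
  have hRA : g.RA = (g.e.reg .rsp).toNat := rfl
  have hpos : Pos g A := Pos.of hfr hcur
  have p1 := hpos.r_eq
  have p2 := hpos.ra_lo
  have p3 := hpos.ra_hi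
  have hf1 := hpos.f_lo
  have hf2 := hpos.f_hi
  have hf3 := hpos.f_stack
  have hsp : (v.reg .rsp).toNat = g.R := by
    rw [hfr.rsp]
    exact toNat_addr _ (by omega)
  have c_r14 := hcur.r14
  have hslotf : v.mem.readLE (v.reg .rsp + 24) 8 = g.f := by
    have := hcur.slot_f
    rw [hfr.rsp]
    simp only [vfield]
    exact this
  have hslotm : v.mem.readLE (v.reg .rsp + 40) 8 = mults := by
    have := h.mults.slot
    rw [hfr.rsp]
    simp only [vfield]
    exact this
  -- the temp stack: the `mults` block is its only block, at `B + T`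
  have hlv1 := h.mults.lv_pos
  have hlv2 := h.mults.lv_lt
  obtain ⟨lv, hlv⟩ : ∃ lv, Codebook.lookup_values v.mem (g.cb v.mem i) = lv := ⟨_, rfl⟩
  rw [hlv] at c_rcx hlv1 hlv2
  have htm := h.mults.temps
  rw [hlv] at htm
  obtain ⟨ht1, ht2⟩ := htm
  simp only [List.map_cons, List.map_nil] at ht1
  have hB := ht2 (mults, 2 * lv) List.mem_cons_self
  simp only [] at hB
  obtain ⟨htop, htopL⟩ := hcur.sd.arena.top_eq_T ht1
  have htemps : A.1.temps = (A.1.T, 2 * lv) :: [] := by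
    rw [ht1, htop]
  have hmT : mults = A.1.B + A.1.T := by omega
  have p4 := hpos.ar_lo
  have p5 := hpos.ar_hi
  have hfree := h_free A.2 g.frames' A.1 (2 * lv) []
  u_walk hcode [hμ.vendor] until [Vorbis.L.start_decoder.cut173] span [Vorbis.L.textLo, Vorbis.L.textHi] side (v_side)
  case call_inv => v_inv
  case pre_115037 =>
    have hun : ShadowUntouched v.mem s_115037.mem := by v_untouched
    have hrdi : (s_115037.reg .rdi).toNat = g.f := by
      rw [w_rdi]
      exact toNat_addr _ (by omega)
    have hpre : ArenaPre A.1 A.2 g.frames' s_115037 := by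
      apply c13d_arena_pre hfr hcur hun
      · rw [w_mem]
        apply Mem.EqOn.writeLE
        · u_omega
        · u_omega
      · rw [w_rsp]
        u_omega
      · exact hrdi
    refine ⟨hpre, Or.inr ⟨htemps, ?_, ?_, ?_⟩⟩
    · rw [w_rsi, hmT]
      exact toNat_addr _ (by omega)
    · rw [w_rdx, c13d_edx lv hlv2]
    · rw [hrdi]
      exact setup_temp_free.apart_of_out hcur.sd.arena htemps hpos.objOut
  -- 0x11503c: setup_temp_free(f, mults, 2·LV) returned
  simp only [X86.User.Spec.footprint, vspec] at w_same
  have e_sp : (s_115037.reg .rsp).toNat + 8 = g.R := by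
    rw [w_rsp_115037]
    u_omega
  have e_a : (v.reg .rsp - 8).toNat + 8 = g.R := by u_omega
  have e_rdi : (s_115037.reg .rdi).toNat = g.f := by
    rw [w_rdi_115037]
    exact toNat_addr _ (by omega)
  have e_rsi : (s_115037.reg .rsi).toNat = A.1.B + A.1.T := by
    rw [w_rsi_115037, hmT]
    exact toNat_addr _ (by omega)
  have e_sz : r8 ((s_115037.reg .rdx).toNat % 2 ^ 32) = r8 (2 * lv) := by
    rw [w_rdx_115037, c13d_edx lv hlv2]
  have hne : s_115037.reg .rsi ≠ 0 := by
    intro h0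
    rw [h0] at e_rsi
    have : (0 : Word).toNat = 0 := rfl
    omega
  obtain ⟨r1, r2, r3, r4⟩ := Cur.free_call (pc' := Vorbis.L.start_decoder.cut173) hfr hcur w_mem_115037 e_a e_sp e_rdi htemps
    e_rsi e_sz w_same w_post hne w_rip w_rsp (Vorbis.conv_code_eqOn w_code) w_inv (w_kept.get .r14 rfl)
  exact ReachVia.done ⟨_, i, A2, A3, Ai, r1, r2, w_rbp⟩

/-- The overflow stub, second half (0x11503c … 0x115049: `mov esi, 14H ; mov rdi, rbp ; call error ; jmp 0x113b22`): `error` writes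
`f->error` only (`Frame.step`, `Cur.step`), `eax = 0`, SD.ERR by `Cur.failed`. -/
theorem c13d_err (Lay : Layout) (hLay : Lay.hi = 0x1000000) (μ : Microarch) (hμ : UserX.MicroOK μ) (u₀ : State)
    (hcode : HasCodeNat Lay u₀ Vorbis.L.start_decoder.entry Vorbis.Code.code_start_decoder.nat Vorbis.L.start_decoder.size)
    (h_error : ∀ (others : List Obj) (frames : List (Nat × FrameLayout)), Calls Lay μ Vorbis.WayInv (Vorbis.conv u₀) Vorbis.L.error.entry (Vorbis.Spec.error.spec others frames))
    (g : Ghost) (v : State) (hat : c13d_AtFreed u₀ g v) :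
    ReachVia Lay μ WayInv v (fun w => AtERR u₀ g w) := by
  obtain ⟨A, i, A2, A3, Ai, hfr, hcur, c_rbp⟩ := hat
  have he := hfr.entry
  v_entry he
  simp only [depth] at he_room he_stack
  have w_rip := hfr.rip
  have w_eq : Mem.EqOn Vorbis.L.textLo Vorbis.L.textHi u₀.mem v.mem := hfr.code
  have hdf : v.flags .df = false := (show abiInv _ from hfr.inv).1
  have hmx : v.mxcsr &&& 0x1F80 = 0x1F80 := (show abiInv _ from hfr.inv).2
  have hsse := Vorbis.sseOK_of_abiInv hfr.inv
  have hRA : g.RA = (g.e.reg .rsp).toNat := rfl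
  have hpos : Pos g A := Pos.of hfr hcur
  have p1 := hpos.r_eq
  have p2 := hpos.ra_lo
  have p3 := hpos.ra_hi
  have hf1 := hpos.f_lo
  have hf2 := hpos.f_hi
  have hf3 := hpos.f_stack
  have hsp : (v.reg .rsp).toNat = g.R := by
    rw [hfr.rsp]
    exact toNat_addr _ (by omega)
  have herr := h_error A.2 g.frames'
  u_walk hcode [hμ.vendor] until [Vorbis.L.start_decoder.cut4] span [Vorbis.L.textLo, Vorbis.L.textHi] side (v_side)
  case call_inv => v_inv
  case pre_115044 =>
    have hun : ShadowUntouched v.mem s_115044.mem := by v_untouched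
    have e8 : (s_115044.reg .rsp).toNat + 8 = g.R := by
      rw [w_rsp]
      u_omega
    refine ⟨⟨?_, hfr.offText⟩, ?_⟩
    · rw [e8]
      exact hfr.shadow.untouched hun
    · rw [w_rdi, toNat_addr _ (by omega)]
      apply hcur.hand.obj.mono
      intro o ho
      unfold Ghost.frames'
      rw [stackObjs_cons]
      rcases List.mem_append.mp ho with hs | ho'
      · exact List.mem_append_left _ (List.mem_append_right _ hs)
      · exact List.mem_append_right _ ho'
  -- 0x115049: error(f, 20) returned
  obtain ⟨hrax, hunp, _⟩ := w_post
  have hs0 := w_same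
  simp only [X86.User.Spec.footprint, vspec, w_rsp_115044, w_rdi_115044] at hs0
  have hfT : (addr g.f).toNat = g.f := toNat_addr _ (by omega)
  have hun0 : ShadowUntouched v.mem s_115044.mem := by v_untouched
  have hsx : Mem.SameExcept [⟨g.R - 8, g.R⟩] v.mem s_115044.mem := by
    rw [w_mem_115044]
    apply Mem.SameExcept.writeLE
    · u_omega
    · refine ⟨_, List.mem_cons_self, ?_, ?_⟩
      · simp only []
        u_omega
      · simp only []
        u_omega
  have hall : Mem.SameExcept [⟨g.R - 56, g.R⟩, ⟨g.f + 140, g.f + 144⟩] v.mem s_115044r.mem := by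
    apply Mem.SameExcept.trans
    · apply hsx.mono
      intro w hw a h1 h2
      rw [List.mem_singleton.mp hw] at h1 h2
      simp only [] at h1 h2
      exact ⟨_, List.mem_cons_self, by simp only []; omega, by simp only []; omega⟩
    · apply hs0.mono
      intro w hw a h1 h2
      simp only [List.mem_cons, List.mem_nil_iff, or_false] at hw
      rcases hw with rfl | rfl
      · simp only [] at h1 h2
        refine ⟨_, List.mem_cons_self, ?_, ?_⟩
        · simp only []
          u_omega
        · simp only []
          u_omega
      · simp only [] at h1 h2
        refine ⟨_, List.mem_cons_of_mem _ List.mem_cons_self, ?_, ?_⟩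
        · simp only []
          omega
        · simp only []
          omega
  have hunAll : ShadowUntouched v.mem s_115044r.mem := Mem.EqOn.trans hun0 hunp
  v_after_call w_rsp_115044 w_mem_115044
  have w_rax : s_115044r.reg .rax = 0 := hrax
  u_walk hcode [hμ.vendor] until [Vorbis.L.start_decoder.cut4] span [Vorbis.L.textLo, Vorbis.L.textHi] side (v_side)
  -- 0x113b22: the epilogue, `eax = 0`
  rw [← w_mem] at hall hunAll
  have hinv : abiInv s_115049 := by
    refine Vorbis.abiInv_of ?_ ?_
    · rw [w_flags]
      exact w_df
    · rw [w_mxcsr]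
      exact w_mx
  have hb : Bits (g.Blk A) g.len s_115049.mem g.f := by
    apply bits_kept hpos hcur.sd.bits hall
    intro w hw
    simp only [List.mem_cons, List.mem_nil_iff, or_false] at hw
    rcases hw with rfl | rfl
    · left
      simp only []
      omega
    · right
      right
      left
      simp only []
      omega
  have hok : ∀ x, x ∈ [(⟨g.R - 56, g.R⟩ : Span), ⟨g.f + 140, g.f + 144⟩] → OkWin g Ai A (g.cb v.mem i) x := by
    intro x hx
    simp only [List.mem_cons, List.mem_nil_iff, or_false] at hx
    apply OkWin0.ok
    unfold OkWin0
    rcases hx with rfl | rfl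
    · left
      simp only []
      omega
    · right
      right
      right
      right
      right
      right
      left
      simp only []
      omega
  have hF := Frame.step (pc' := Vorbis.L.start_decoder.cut4) hfr hcur hall hunAll hok hb w_rip w_rsp w_eq hinv
  obtain ⟨hC, _⟩ := Cur.step hfr hcur hall hunAll hok hb (w_kept.get .r14 rfl)
  refine ReachVia.done ⟨A, { frame := hF, hand := hC.hand, result := Or.inl ⟨?_, hC.failed⟩ }⟩
  rw [w_rax]
  rfl

end Vorbis.Spec.start_decoder_C13d
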